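-- pv_equiv track=rewrite | github.com/micosacak/scRNA-seq_website | single_cell_webpage.py | getPossGenes
-- ===== SOURCE A (Python) =====
-- def getPossGenes(my_org, gene_name, max_len = 3, i = 1):
-- 	# a naive algorithm to search for the gene names.
-- 	indexes = getIndexes(my_org,gene_name[0:i])
-- 	while len(getIndexes(my_org,gene_name[0:i])) >= max_len and i <= len(gene_name):
-- 		indexes = getIndexes(my_org,gene_name[0:i])
-- 		i += 1
-- 	possible_genes = [my_org[idx] for idx in indexes]
-- 	possible_genes.sort()
-- 	return possible_genes[0:50]
--
-- def getIndexes(my_list, my_char):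
--     return [i for i in range(0, len(my_list)) if my_list[i].startswith(my_char) or my_list[i].startswith(my_char.lower())]
-- ===== SOURCE B (Python) =====
-- def getPossGenes(my_org, gene_name, max_len=3, i=1):
--     # Precompute, per name, how deep it matches gene_name (max of the common-prefix
--     # lengths with gene_name and its lowercase form).  The prefix-widening loop then
--     # only compares integer counts, and one final filter+sort builds the result.
--     low = gene_name.lower()
--
--     def common(s, p):
--         k = 0
--         while k < len(s) and k < len(p) and s[k] == p[k]:
--             k += 1
--         return k
--
--     depth = [max(common(s, gene_name), common(s, low)) for s in my_org]
--
--     t = len(gene_name[:i])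
--     while sum(1 for m in depth if m >= len(gene_name[:i])) >= max_len and i <= len(gene_name):
--         t = len(gene_name[:i])
--         i += 1
--
--     matches = sorted(s for s, m in zip(my_org, depth) if m >= t)
--     return matches[:50]
-- ===== Notes on version B (the rewrite author's own statement) =====
-- stated objective: faster
-- what changed: B precomputes for every name the deepest matching prefix depth (max of common-prefix lengths with gene_name and gene_name.lower()) in one pass, so the prefix-widening loop only compares an integer count per step and a single final filter+sort builds the result, instead of A's full startswith rescans of the whole list (getIndexes, twice per iteration).
import Mathlib
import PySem

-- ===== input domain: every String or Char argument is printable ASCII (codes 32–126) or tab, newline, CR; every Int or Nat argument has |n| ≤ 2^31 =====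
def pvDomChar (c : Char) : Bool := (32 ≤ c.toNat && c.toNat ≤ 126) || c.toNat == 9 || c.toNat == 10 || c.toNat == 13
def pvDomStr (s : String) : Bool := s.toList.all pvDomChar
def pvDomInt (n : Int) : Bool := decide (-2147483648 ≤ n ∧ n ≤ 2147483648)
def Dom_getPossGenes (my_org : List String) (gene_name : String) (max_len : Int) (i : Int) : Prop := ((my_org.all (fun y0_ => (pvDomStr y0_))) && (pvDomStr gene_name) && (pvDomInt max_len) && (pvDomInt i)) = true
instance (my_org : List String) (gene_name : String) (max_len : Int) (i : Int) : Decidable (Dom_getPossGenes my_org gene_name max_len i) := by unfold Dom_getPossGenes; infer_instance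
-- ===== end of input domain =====

-- B precomputes each name's deepest matching prefix depth once, so the widening loop only
-- compares counts instead of rescanning the list per prefix (objective: faster).

-- ===== PORT A =====
def getIndexes (my_list : List String) (my_char : String) : List Int :=
  (PySem.List.pyRange 0 my_list.length 1).filter (fun j =>
    PySem.Str.startswith (PySem.List.pyGetD my_list j "") my_char
    || PySem.Str.startswith (PySem.List.pyGetD my_list j "") (PySem.Str.lower my_char))

def loopA (my_org : List String) (gene_name : String) (max_len : Int)
    (i : Int) (indexes : List Int) : List Int :=
  if h : max_len ≤ ((getIndexes my_org (PySem.Str.slice gene_name (some 0) (some i))).length : Int)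
       ∧ i ≤ (gene_name.toList.length : Int) then
    loopA my_org gene_name max_len (i + 1)
      (getIndexes my_org (PySem.Str.slice gene_name (some 0) (some i)))
  else indexes
termination_by ((gene_name.toList.length : Int) + 1 - i).toNat
decreasing_by omega

def getPossGenes (my_org : List String) (gene_name : String) (max_len : Int) (i : Int) : List String :=
  let indexes := loopA my_org gene_name max_len i
    (getIndexes my_org (PySem.Str.slice gene_name (some 0) (some i)))
  let possible_genes := indexes.map (fun idx => PySem.List.pyGetD my_org idx "")
  PySem.List.slice (PySem.List.sorted possible_genes (fun x => x) false) (some 0) (some 50)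

-- ===== PORT B =====
-- Source B's common(s, p): common-prefix length, the while-k loop as structural recursion
def cplB : List Char → List Char → Nat
  | c :: s, d :: p => if c = d then cplB s p + 1 else 0
  | _, _ => 0

-- Source B's len(gene_name[:j]); a Python length is nonnegative, so .toNat is exact
def lenPrefB (gene_name : String) (j : Int) : Nat :=
  (PySem.Str.len (PySem.Str.slice gene_name none (some j))).toNat

-- Source B's sum(1 for m in depth if m >= t)
def cntB (ms : List Nat) (t : Nat) : Nat := ms.countP (fun m => t ≤ m)

-- Source B's while loop: carries the accepted prefix length t alongside j
def loopB (ms : List Nat) (max_len : Int) (gene_name : String) (t : Nat) (j : Int) : Nat :=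
  if h : max_len ≤ (cntB ms (lenPrefB gene_name j) : Int)
       ∧ j ≤ PySem.Str.len gene_name then
    loopB ms max_len gene_name (lenPrefB gene_name j) (j + 1)
  else t
termination_by (PySem.Str.len gene_name + 1 - j).toNat
decreasing_by omega

def getPossGenes_alt (my_org : List String) (gene_name : String) (max_len : Int) (i : Int) : List String :=
  let low := PySem.Str.lower gene_name
  let depth := my_org.map (fun s => max (cplB s.toList gene_name.toList) (cplB s.toList low.toList))
  let t := loopB depth max_len gene_name (lenPrefB gene_name i) i
  let matched := PySem.List.sorted
      (((my_org.zip depth).filter (fun p => t ≤ p.2)).map (fun p => p.1)) (fun x => x) false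
  PySem.List.slice matched (some 0) (some 50)

-- ===== PRECONDITION & SPEC =====
def Spec_getPossGenes (my_org : List String) (gene_name : String) (max_len : Int) (i : Int) (out : List String) : Prop := out = getPossGenes_alt my_org gene_name max_len i
instance (my_org : List String) (gene_name : String) (max_len : Int) (i : Int) (out : List String) : Decidable (Spec_getPossGenes my_org gene_name max_len i out) := by unfold Spec_getPossGenes; infer_instance

-- ===== CLAIM (what is proved, stated in full; the proofs are below) =====
def Claim_equal_getPossGenes : Prop := ∀ (my_org : List String) (gene_name : String) (max_len : Int) (i : Int), Dom_getPossGenes my_org gene_name max_len i → Spec_getPossGenes my_org gene_name max_len i (getPossGenes my_org gene_name max_len i)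

-- ===== LEMMAS AND PROOFS =====

-- length of the effective prefix gene_name[:j] (proof-side form of lenPrefB)
def effB (L : Nat) (j : Int) : Nat :=
  if j < 0 then ((L : Int) + j).toNat else min j.toNat L

-- per-name deepest matching prefix depth (proof-side name for B's depth entries)
def mdep (gene s : String) : Nat :=
  max (cplB s.toList gene.toList) (cplB s.toList (PySem.Chars.lower gene.toList))

theorem effB_le (L : Nat) (j : Int) : effB L j ≤ L := by
  unfold effB; split <;> omega

theorem slice_to_take {α : Type} (xs : List α) (j : Int) :
    PySem.List.slice xs none (some j) = xs.take (effB xs.length j) := by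
  simp only [PySem.List.slice, PySem.List.clampIdx, effB]
  split_ifs with h1 h2
  · simp
    omega
  · simp
  · simp

theorem lenPrefB_eq (gene : String) (j : Int) :
    lenPrefB gene j = effB gene.toList.length j := by
  unfold lenPrefB
  rw [PySem.Str.len_eq, Int.toNat_natCast, PySem.Str.toList_slice,
    PySem.Chars.slice_eq_listSlice, slice_to_take, List.length_take]
  exact min_eq_left (effB_le _ _)

theorem cpl_ge_iff : ∀ (s p : List Char) (t : Nat), t ≤ p.length →
    (t ≤ cplB s p ↔ p.take t <+: s)
  | _, _, 0, _ => by simp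
  | [], d :: p', t + 1, _ => by
      simp [cplB, List.take_succ_cons]
  | c :: s', [], t + 1, ht => by simp at ht
  | c :: s', d :: p', t + 1, ht => by
      rw [List.take_succ_cons, List.cons_prefix_cons]
      show t + 1 ≤ (if c = d then cplB s' p' + 1 else 0) ↔ _
      by_cases hcd : c = d
      · subst hcd
        rw [if_pos rfl]
        have hiff := cpl_ge_iff s' p' t (by simpa using ht)
        constructor
        · intro h; exact ⟨rfl, hiff.mp (by omega)⟩
        · intro h; have := hiff.mpr h.2; omega
      · rw [if_neg hcd]
        constructor
        · intro h; omega
        · intro h; exact absurd h.1.symm hcd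

theorem startswith_take (s p : List Char) (t : Nat) (ht : t ≤ p.length) :
    PySem.Chars.startswith s (p.take t) = decide (t ≤ cplB s p) := by
  rw [Bool.eq_iff_iff]
  simp [PySem.Chars.startswith_iff, cpl_ge_iff s p t ht]

-- the two-sided startswith test of A equals B's depth comparison
theorem pred_eq (gene s : String) (j : Int) :
    (PySem.Str.startswith s (PySem.Str.slice gene (some 0) (some j))
      || PySem.Str.startswith s (PySem.Str.lower (PySem.Str.slice gene (some 0) (some j))))
    = decide (effB gene.toList.length j ≤ mdep gene s) := by
  have hlen : (PySem.Chars.lower gene.toList).length = gene.toList.length := by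
    simp [PySem.Chars.lower]
  have hsl : (PySem.Str.slice gene (some 0) (some j)).toList
      = gene.toList.take (effB gene.toList.length j) := by
    rw [PySem.Str.toList_slice, PySem.Chars.slice_eq_listSlice,
      PySem.List.slice_zero_start, slice_to_take]
  rw [PySem.Str.startswith_eq, PySem.Str.startswith_eq, PySem.Str.toList_lower, hsl]
  have hlow : PySem.Chars.lower (gene.toList.take (effB gene.toList.length j))
      = (PySem.Chars.lower gene.toList).take (effB gene.toList.length j) := by
    simp [PySem.Chars.lower, List.map_take]
  rw [hlow, startswith_take _ _ _ (effB_le _ _),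
    startswith_take _ _ _ (by rw [hlen]; exact effB_le _ _)]
  rw [Bool.eq_iff_iff]
  simp [mdep]

theorem range_getD_filter {α : Type} (q : α → Bool) (d : α) : ∀ (l : List α),
    ((List.range l.length).filter (fun k => q (l[k]?.getD d))).map (fun k => l[k]?.getD d)
      = l.filter q
  | [] => by simp
  | x :: xs => by
      rw [List.length_cons, List.range_succ_eq_map]
      by_cases hx : q x <;>
        simpa [hx, List.filter_map, List.map_map, Function.comp_def] using
          range_getD_filter q d xs

-- A's comprehension over range(len): the matched values are a filter of the list
theorem getIndexes_map (l : List String) (p : String) :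
    (getIndexes l p).map (fun idx => PySem.List.pyGetD l idx "")
      = l.filter (fun s => PySem.Str.startswith s p || PySem.Str.startswith s (PySem.Str.lower p)) := by
  unfold getIndexes
  rw [PySem.List.pyRange_one]
  simp only [List.filter_map, List.map_map, Function.comp_def, zero_add,
    PySem.List.pyGetD_natCast, List.getD_eq_getElem?_getD]
  exact range_getD_filter
    (fun s => PySem.Str.startswith s p || PySem.Str.startswith s (PySem.Str.lower p)) "" l

theorem getIndexes_length (l : List String) (p : String) :
    (getIndexes l p).length
      = l.countP (fun s => PySem.Str.startswith s p || PySem.Str.startswith s (PySem.Str.lower p)) := by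
  have h := congrArg List.length (getIndexes_map l p)
  rw [List.length_map] at h
  rw [h, List.countP_eq_length_filter]

theorem len_eq_cnt (my_org : List String) (gene : String) (j : Int) :
    (getIndexes my_org (PySem.Str.slice gene (some 0) (some j))).length
      = cntB (my_org.map (mdep gene)) (effB gene.toList.length j) := by
  rw [getIndexes_length, cntB, List.countP_map]
  apply List.countP_congr
  intro s _
  simp only [Function.comp_def]
  rw [pred_eq]

-- A's values at any slice equal B's filter at the matching threshold
theorem getIndexes_filter (my_org : List String) (gene : String) (j : Int) :
    (getIndexes my_org (PySem.Str.slice gene (some 0) (some j))).map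
        (fun idx => PySem.List.pyGetD my_org idx "")
      = my_org.filter (fun s => decide (effB gene.toList.length j ≤ mdep gene s)) := by
  rw [getIndexes_map]
  exact List.filter_congr (fun s _ => pred_eq gene s j)

-- the central invariant: A's loop on index lists mirrors B's loop on thresholds
theorem loopAB (my_org : List String) (gene : String) (max_len : Int) :
    ∀ (j : Int) (idx : List Int) (t : Nat),
      idx.map (fun k => PySem.List.pyGetD my_org k "")
        = my_org.filter (fun s => decide (t ≤ mdep gene s)) →
      (loopA my_org gene max_len j idx).map (fun k => PySem.List.pyGetD my_org k "")
        = my_org.filter (fun s =>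
            decide (loopB (my_org.map (mdep gene)) max_len gene t j ≤ mdep gene s)) := by
  intro j idx
  fun_induction loopA with
  | case1 i indexes h ih =>
    intro t _
    have hcond : max_len ≤ (cntB (my_org.map (mdep gene)) (lenPrefB gene i) : Int)
        ∧ i ≤ PySem.Str.len gene := by
      rw [lenPrefB_eq, PySem.Str.len_eq]
      refine ⟨?_, h.2⟩
      have := len_eq_cnt my_org gene i
      omega
    rw [loopB, dif_pos hcond]
    exact ih (lenPrefB gene i)
      (by rw [lenPrefB_eq]; exact getIndexes_filter my_org gene i)
  | case2 i indexes h =>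
    intro t ht
    have hcond : ¬ (max_len ≤ (cntB (my_org.map (mdep gene)) (lenPrefB gene i) : Int)
        ∧ i ≤ PySem.Str.len gene) := by
      rw [lenPrefB_eq, PySem.Str.len_eq]
      intro hc
      have := len_eq_cnt my_org gene i
      exact h ⟨by omega, hc.2⟩
    rw [loopB, dif_neg hcond]
    exact ht

theorem zip_filter_map (f : String → Nat) (t : Nat) : ∀ (l : List String),
    ((l.zip (l.map f)).filter (fun p => decide (t ≤ p.2))).map (fun p => p.1)
      = l.filter (fun s => decide (t ≤ f s))
  | [] => by simp
  | x :: xs => by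
      by_cases hx : t ≤ f x <;> simp [hx, zip_filter_map f t xs]

-- ===== VERDICT (by name: the statement is the Claim_ definition above) =====
theorem getPossGenes_spec : Claim_equal_getPossGenes := by
  intro my_org gene max_len i _
  unfold Spec_getPossGenes getPossGenes getPossGenes_alt
  simp only
  have hms : my_org.map (fun s => max (cplB s.toList gene.toList)
      (cplB s.toList (PySem.Str.lower gene).toList)) = my_org.map (mdep gene) := by
    simp only [PySem.Str.toList_lower]
    rfl
  rw [hms]
  congr 1
  congr 1
  rw [loopAB my_org gene max_len i _ (lenPrefB gene i)
      (by rw [lenPrefB_eq]; exact getIndexes_filter my_org gene i)]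
  rw [zip_filter_map (mdep gene) _ my_org]
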